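-- pv_equiv track=rewrite | github.com/xdofai/xdof-sim | xdof_sim/dataset_export/metadata.py | normalize_task_name
-- ===== SOURCE A (Python) =====
-- def normalize_task_name(instruction: str | None, fallback: str) -> str:
--     """Convert free-form task text into the xdof dataset key format."""
--     value = (instruction or fallback or "unknown").strip().lower()
--     chars: list[str] = []
--     last_was_sep = False
--     for char in value:
--         if char.isalnum():
--             chars.append(char)
--             last_was_sep = False
--         elif not last_was_sep:
--             chars.append("_")
--             last_was_sep = True
--     return "".join(chars).strip("_") or "unknown"
-- ===== SOURCE B (Python) =====
-- def normalize_task_name(instruction, fallback):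
--     """Convert free-form task text into the xdof dataset key format."""
--     value = (instruction or fallback or "unknown").strip().lower()
--     tokens = "".join(c if c.isalnum() else " " for c in value).split()
--     return "_".join(tokens) or "unknown"
-- ===== Notes on version B (the rewrite author's own statement) =====
-- stated objective: idiomatic
-- what changed: Replaces the explicit last_was_sep state machine and trailing strip('_') with a stateless map of each non-alphanumeric char to a space followed by str.split(), which tokenizes and collapses/trims separator runs in one built-in call, then '_'.join.
import Mathlib
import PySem

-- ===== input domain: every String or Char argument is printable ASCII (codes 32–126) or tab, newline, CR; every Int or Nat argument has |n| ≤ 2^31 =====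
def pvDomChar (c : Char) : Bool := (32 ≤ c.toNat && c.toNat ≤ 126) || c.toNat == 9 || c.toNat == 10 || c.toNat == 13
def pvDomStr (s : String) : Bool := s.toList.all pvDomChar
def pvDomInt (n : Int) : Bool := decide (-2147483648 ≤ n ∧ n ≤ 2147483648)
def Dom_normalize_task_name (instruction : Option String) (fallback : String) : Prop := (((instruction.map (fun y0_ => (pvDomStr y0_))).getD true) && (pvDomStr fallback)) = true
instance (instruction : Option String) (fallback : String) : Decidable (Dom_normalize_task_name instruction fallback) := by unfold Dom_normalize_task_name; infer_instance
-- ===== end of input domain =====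

-- B replaces A's last_was_sep state machine + strip('_') with a stateless char map to spaces and str.split(); same result, no speed claim.

-- ===== PORT A =====
-- `instruction or fallback or "unknown"` — string truthiness = nonempty
def pvOrChain (instruction : Option String) (fallback : String) : String :=
  match instruction with
  | some s => if s ≠ "" then s else (if fallback ≠ "" then fallback else "unknown")
  | none => if fallback ≠ "" then fallback else "unknown"

def normalize_task_name (instruction : Option String) (fallback : String) : String :=
  let value := PySem.Str.lower (PySem.Str.strip (pvOrChain instruction fallback))
  -- for char in value: if char.isalnum(): append; elif not last_was_sep: append '_'
  let st := value.toList.foldl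
    (fun (st : List Char × Bool) c =>
      if PySem.Chars.isalnum c then (st.1 ++ [c], false)
      else if !st.2 then (st.1 ++ ['_'], true) else st)
    ([], false)
  let res := PySem.Str.stripChars (String.ofList st.1) "_"   -- "".join(chars).strip("_")
  if res = "" then "unknown" else res

-- ===== PORT B =====
def normalize_task_name_alt (instruction : Option String) (fallback : String) : String :=
  let value := PySem.Str.lower (PySem.Str.strip (pvOrChain instruction fallback))
  -- "".join(c if c.isalnum() else " " for c in value).split()
  let tokens := PySem.Chars.split₀ (value.toList.map (fun c => if PySem.Chars.isalnum c then c else ' '))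
  let res := PySem.Chars.join ['_'] tokens              -- "_".join(tokens)
  if res = [] then "unknown" else String.ofList res

-- ===== PRECONDITION & SPEC =====
def Spec_normalize_task_name (instruction : Option String) (fallback : String) (out : String) : Prop := out = normalize_task_name_alt instruction fallback
instance (instruction : Option String) (fallback : String) (out : String) : Decidable (Spec_normalize_task_name instruction fallback out) := by unfold Spec_normalize_task_name; infer_instance

-- ===== CLAIM (what is proved, stated in full; the proofs are below) =====
def Claim_equal_normalize_task_name : Prop := ∀ (instruction : Option String) (fallback : String), Dom_normalize_task_name instruction fallback → Spec_normalize_task_name instruction fallback (normalize_task_name instruction fallback)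

-- ===== LEMMAS AND PROOFS =====

-- proof-only helpers: the map A/B classify with, the word decomposition, and A's scan as structural recursion
def pvF (c : Char) : Char := if PySem.Chars.isalnum c then c else ' '

def pvW : List Char → List (List Char)
  | [] => []
  | c :: r =>
    if PySem.Chars.isalnum c then
      (c :: r.takeWhile PySem.Chars.isalnum) :: pvW (r.dropWhile PySem.Chars.isalnum)
    else pvW r
termination_by v => v.length
decreasing_by
  · simp only [List.length_cons]
    have := List.length_dropWhile_le PySem.Chars.isalnum r
    omega
  · simp

def pvScan : List Char → Bool → List Char × Bool
  | [], b => ([], b)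
  | c :: r, b =>
    if PySem.Chars.isalnum c then (c :: (pvScan r false).1, (pvScan r false).2)
    else if b then pvScan r true
    else ('_' :: (pvScan r true).1, (pvScan r true).2)

theorem pv_alnum_facts (c : Char) (h : PySem.Chars.isalnum c = true) :
    c ≠ '_' ∧ PySem.Chars.isspace c = false := by
  simp [PySem.Chars.isalnum, PySem.Chars.isalpha, PySem.Chars.isdigit, PySem.Chars.isupper,
        PySem.Chars.islower, PySem.Chars.isspace, Char.le_def, UInt32.le_iff_toNat_le,
        Char.ext_iff, UInt32.ext_iff] at h ⊢
  omega

theorem pv_isspace_f (c : Char) :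
    PySem.Chars.isspace (pvF c) = !PySem.Chars.isalnum c := by
  unfold pvF
  by_cases h : PySem.Chars.isalnum c = true
  · simp [h, (pv_alnum_facts c h).2]
  · simp only [Bool.not_eq_true] at h
    simp [h]
    decide

theorem pv_foldl_scan (v : List Char) (cs : List Char) (b : Bool) :
    v.foldl (fun (st : List Char × Bool) c =>
        if PySem.Chars.isalnum c then (st.1 ++ [c], false)
        else if !st.2 then (st.1 ++ ['_'], true) else st) (cs, b)
      = (cs ++ (pvScan v b).1, (pvScan v b).2) := by
  induction v generalizing cs b with
  | nil => simp [pvScan]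
  | cons c r ih =>
    by_cases h : PySem.Chars.isalnum c = true
    · simp only [List.foldl_cons, h, if_true]
      rw [ih]
      simp [pvScan, h]
    · cases b with
      | true =>
        simp only [List.foldl_cons, h, Bool.not_true, Bool.false_eq_true, if_false]
        rw [ih]
        simp [pvScan, h]
      | false =>
        simp only [List.foldl_cons, h, Bool.not_false, if_true, Bool.false_eq_true, if_false]
        rw [ih]
        simp [pvScan, h]

theorem pv_go_eq (v cur : List Char) (acc : List (List Char)) :
    PySem.Chars.split₀.go (v.map pvF) cur acc =
      acc.reverse ++ (if cur.isEmpty then pvW v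
        else (cur.reverse ++ v.takeWhile PySem.Chars.isalnum)
              :: pvW (v.dropWhile PySem.Chars.isalnum)) := by
  induction v generalizing cur acc with
  | nil =>
    simp only [List.map_nil, PySem.Chars.split₀.go]
    cases cur <;> simp [pvW]
  | cons c r ih =>
    simp only [List.map_cons, PySem.Chars.split₀.go, pv_isspace_f]
    by_cases h : PySem.Chars.isalnum c = true
    · simp only [h, Bool.not_true, if_neg (by simp : ¬ (false = true))]
      have hfc : pvF c = c := by simp [pvF, h]
      rw [hfc, ih (c :: cur) acc]
      cases cur <;> simp [pvW, h, List.takeWhile_cons, List.dropWhile_cons]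
    · simp only [Bool.not_eq_true] at h
      simp only [h, Bool.not_false, if_pos rfl]
      cases cur with
      | nil => simp [ih [] acc, pvW, h]
      | cons x xs =>
        simp only [List.isEmpty_cons, if_neg (by simp : ¬ ((x :: xs).isEmpty = true))]
        rw [ih [] (((x :: xs).reverse) :: acc)]
        simp [pvW, h, List.takeWhile_cons, List.dropWhile_cons]

theorem pv_scan_run (w v : List Char) (b : Bool)
    (h : ∀ c ∈ w, PySem.Chars.isalnum c = true) :
    (pvScan (w ++ v) b).1 = w ++ (pvScan v (if w.isEmpty then b else false)).1 := by
  induction w generalizing b with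
  | nil => simp
  | cons c w' ih =>
    have hc := h c (by simp)
    simp only [List.cons_append, pvScan, hc, if_pos rfl, List.isEmpty_cons]
    rw [ih false (fun x hx => h x (by simp [hx]))]
    cases w' <;> simp

theorem pv_scan_true_nil_iff (v : List Char) :
    (pvScan v true).1 = [] ↔ ∀ c ∈ v, PySem.Chars.isalnum c = false := by
  induction v with
  | nil => simp [pvScan]
  | cons c r ih =>
    by_cases h : PySem.Chars.isalnum c = true
    · simp [pvScan, h]
    · simp only [Bool.not_eq_true] at h
      simp [pvScan, h, ih]

theorem pvW_nil_iff (v : List Char) :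
    pvW v = [] ↔ ∀ c ∈ v, PySem.Chars.isalnum c = false := by
  induction v using pvW.induct with
  | case1 => simp [pvW]
  | case2 c r h ih =>
    simp [pvW, h]
  | case3 c r h ih =>
    simp only [Bool.not_eq_true] at h
    simp [pvW, h, ih]

theorem pv_scan_true_head (v : List Char) :
    (pvScan v true).1 = [] ∨
      ∃ c t, (pvScan v true).1 = c :: t ∧ PySem.Chars.isalnum c = true := by
  induction v with
  | nil => simp [pvScan]
  | cons c r ih =>
    by_cases h : PySem.Chars.isalnum c = true
    · exact Or.inr ⟨c, (pvScan r false).1, by simp [pvScan, h], h⟩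
    · simp only [Bool.not_eq_true] at h
      simpa [pvScan, h] using ih

theorem pv_dropWhile_head (p : Char → Bool) (l : List Char) (d : Char) (r' : List Char)
    (h : l.dropWhile p = d :: r') : p d = false := by
  induction l with
  | nil => simp at h
  | cons x xs ih =>
    by_cases hx : p x = true
    · exact ih (by simpa [List.dropWhile_cons, hx] using h)
    · simp only [Bool.not_eq_true] at hx
      simp [List.dropWhile_cons, hx] at h
      rw [← h.1]; exact hx

theorem pv_strip_eq (s : List Char) :
    PySem.Chars.stripChars s ['_'] =
      (List.dropWhile (fun c => decide (c = '_'))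
        (List.dropWhile (fun c => decide (c = '_')) s).reverse).reverse := by
  unfold PySem.Chars.stripChars
  simp

theorem pv_strip_wrap (w X : List Char) (hw : w ≠ [])
    (hall : ∀ x ∈ w, PySem.Chars.isalnum x = true) :
    PySem.Chars.stripChars (w ++ X) ['_'] =
      w ++ (List.dropWhile (fun c => decide (c = '_')) X.reverse).reverse := by
  rw [pv_strip_eq]
  obtain ⟨a, w', rfl⟩ := List.exists_cons_of_ne_nil hw
  have ha : ¬ (a = '_') := (pv_alnum_facts a (hall a (by simp))).1
  rcases List.eq_nil_or_concat (a :: w') with hnil | ⟨ys, z, hz⟩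
  · simp at hnil
  · have hz' : PySem.Chars.isalnum z = true := hall z (by rw [hz]; simp)
    have hzp : ¬ (z = '_') := (pv_alnum_facts z hz').1
    have h1 : List.dropWhile (fun c => decide (c = '_')) (a :: w' ++ X)
        = a :: w' ++ X := by
      simp [List.dropWhile_cons, ha]
    rw [h1]
    have h2 : (a :: w' ++ X).reverse = X.reverse ++ (a :: w').reverse := by simp
    rw [h2, hz]
    have h3 : ((ys.concat z)).reverse = z :: ys.reverse := by simp
    rw [h3, List.dropWhile_append]
    by_cases he : (List.dropWhile (fun c => decide (c = '_')) X.reverse).isEmpty = true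
    · rw [if_pos he]
      simp only [List.isEmpty_iff] at he
      simp [List.dropWhile_cons, hzp, he, ← hz]
    · rw [if_neg he]
      simp [← hz]

theorem pv_key : ∀ (n : Nat) (v : List Char) (b : Bool), v.length ≤ n →
    PySem.Chars.stripChars (pvScan v b).1 ['_'] = PySem.Chars.join ['_'] (pvW v) := by
  intro n
  induction n with
  | zero =>
    intro v b hv
    have : v = [] := List.eq_nil_of_length_eq_zero (Nat.le_zero.mp hv)
    subst this
    simp [pvScan, pvW, PySem.Chars.stripChars, PySem.Chars.join_nil]
  | succ n ih =>
    intro v b hv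
    cases v with
    | nil => simp [pvScan, pvW, PySem.Chars.stripChars, PySem.Chars.join_nil]
    | cons c r =>
      have hr : r.length ≤ n := by simpa using hv
      by_cases h : PySem.Chars.isalnum c = true
      · -- a maximal alphanumeric run
        set w : List Char := c :: r.takeWhile PySem.Chars.isalnum with hw
        set rest : List Char := r.dropWhile PySem.Chars.isalnum with hrest
        have hwall : ∀ x ∈ w, PySem.Chars.isalnum x = true := by
          intro x hx
          rw [hw] at hx
          rcases List.mem_cons.mp hx with rfl | hx
          · exact h
          · exact List.mem_takeWhile_imp hx
        have hsplit : c :: r = w ++ rest := by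
          simp [hw, hrest, List.takeWhile_append_dropWhile]
        have hWv : pvW (c :: r) = w :: pvW rest := by
          rw [pvW]; simp [h, hw, hrest]
        have hscan : (pvScan (c :: r) b).1 = w ++ (pvScan rest false).1 := by
          rw [hsplit, pv_scan_run w rest b hwall, hw]
          simp
        have hrestlen : rest.length ≤ r.length := List.length_dropWhile_le _ _
        rw [hscan, hWv]
        cases hre : rest with
        | nil =>
          rw [pvScan]
          rw [pv_strip_wrap w [] (by simp [hw]) hwall]
          simp [pvW, PySem.Chars.join_singleton]
        | cons d r' =>
          have hd : PySem.Chars.isalnum d = false :=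
            pv_dropWhile_head _ r d r' (by rw [← hrest, hre])
          have hscanrest : (pvScan (d :: r') false).1 = '_' :: (pvScan r' true).1 := by
            rw [pvScan]; simp [hd]
          have hWrest : pvW (d :: r') = pvW r' := by rw [pvW]; simp [hd]
          have hr'len : r'.length ≤ n := by
            have : (d :: r').length ≤ r.length := hre ▸ hrestlen
            simp at this; omega
          have hIH := ih r' true hr'len
          rw [hscanrest, hWrest]
          rcases pv_scan_true_head r' with hY | ⟨e, t, hYe, he⟩
          · -- no further word: the scan emitted a trailing '_' only
            have hWr' : pvW r' = [] :=
              (pvW_nil_iff r').mpr ((pv_scan_true_nil_iff r').mp hY)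
            rw [hY, hWr']
            rw [pv_strip_wrap w ['_'] (by simp [hw]) hwall]
            simp [PySem.Chars.join_singleton]
          · -- at least one more word follows
            have hWr' : pvW r' ≠ [] := by
              intro hcon
              have := (pv_scan_true_nil_iff r').mpr ((pvW_nil_iff r').mp hcon)
              rw [hYe] at this; simp at this
            have hnotall : ¬ (List.dropWhile (fun c => decide (c = '_'))
                ((pvScan r' true).1).reverse).isEmpty = true := by
              simp only [List.isEmpty_iff, List.dropWhile_eq_nil_iff]
              intro hcon
              have := hcon e (by rw [hYe]; simp)
              simp at this
              exact (pv_alnum_facts e he).1 this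
            rw [pv_strip_wrap w ('_' :: (pvScan r' true).1) (by simp [hw]) hwall]
            have hXrev : ('_' :: (pvScan r' true).1).reverse
                = ((pvScan r' true).1).reverse ++ ['_'] := by simp
            rw [hXrev, List.dropWhile_append, if_neg hnotall]
            have hstripY : PySem.Chars.stripChars (pvScan r' true).1 ['_'] =
                (List.dropWhile (fun c => decide (c = '_'))
                  ((pvScan r' true).1).reverse).reverse := by
              rw [pv_strip_eq]
              have : List.dropWhile (fun c => decide (c = '_'))
                  (pvScan r' true).1 = (pvScan r' true).1 := by
                rw [hYe]
                simp [List.dropWhile_cons, (pv_alnum_facts e he).1]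
              rw [this]
            rw [hstripY] at hIH
            obtain ⟨q, qs, hq⟩ := List.exists_cons_of_ne_nil hWr'
            rw [hq]
            rw [PySem.Chars.join_cons_cons]
            rw [← hq, ← hIH]
            simp
      · -- separator head: it contributes at most one '_', which lstrip removes
        simp only [Bool.not_eq_true] at h
        have hWv : pvW (c :: r) = pvW r := by rw [pvW]; simp [h]
        rw [hWv]
        cases b with
        | true =>
          rw [show (pvScan (c :: r) true) = pvScan r true by rw [pvScan]; simp [h]]
          exact ih r true hr
        | false =>
          rw [show (pvScan (c :: r) false).1 = '_' :: (pvScan r true).1 by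
            rw [pvScan]; simp [h]]
          have : PySem.Chars.stripChars ('_' :: (pvScan r true).1) ['_'] =
              PySem.Chars.stripChars (pvScan r true).1 ['_'] := by
            rw [pv_strip_eq, pv_strip_eq]
            simp [List.dropWhile_cons]
          rw [this]
          exact ih r true hr

theorem pv_ofList_eq_empty_iff (l : List Char) : (String.ofList l = "") ↔ l = [] := by
  constructor
  · intro h; have := congrArg String.toList h; simpa using this
  · intro h; simp [h]

-- ===== VERDICT (by name: the statement is the Claim_ definition above) =====
theorem normalize_task_name_spec : Claim_equal_normalize_task_name := by
  unfold Claim_equal_normalize_task_name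
  intro instruction fallback _
  unfold Spec_normalize_task_name
  simp only [normalize_task_name, normalize_task_name_alt]
  generalize (PySem.Str.lower (PySem.Str.strip (pvOrChain instruction fallback))).toList = v
  have hB : PySem.Chars.split₀ (v.map (fun c => if PySem.Chars.isalnum c then c else ' ')) = pvW v := by
    show PySem.Chars.split₀ (v.map pvF) = pvW v
    unfold PySem.Chars.split₀
    rw [pv_go_eq v [] []]
    simp
  have hA := pv_foldl_scan v [] false
  simp only [hA, hB, List.nil_append]
  have hstr : PySem.Str.stripChars (String.ofList (pvScan v false).1) "_"
      = String.ofList (PySem.Chars.stripChars (pvScan v false).1 ['_']) := by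
    unfold PySem.Str.stripChars
    congr 1
    · simp
  rw [hstr, pv_key v.length v false le_rfl]
  by_cases hJ : PySem.Chars.join ['_'] (pvW v) = []
  · rw [if_pos ((pv_ofList_eq_empty_iff _).mpr hJ), if_pos hJ]
  · rw [if_neg (fun hc => hJ ((pv_ofList_eq_empty_iff _).mp hc)), if_neg hJ]
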